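-- pv_equiv track=rewrite | github.com/jowagner/mtb-tri-training | scripts/basic_dataset.py | _get_preferred_d_indices
-- ===== SOURCE A (Python) =====
-- def _get_preferred_d_indices(d_size, size, disprefer):
--     if size >= d_size or not disprefer:
--         # use all data
--         return list(range(d_size))
--     # stratify data according to
--     # how strongly items are dispreferred
--     level2indices = {}
--     max_level = 0
--     for d_index in range(d_size):
--         try:
--             level = disprefer[d_index]
--         except KeyError:
--             level = 0
--         if level not in level2indices:
--             level2indices[level] = []
--         level2indices[level].append(d_index)
--         if level > max_level:
--             max_level = level
--     # select as much data as needed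
--     # starting with the lowest levels
--     retval = []
--     level = 0
--     while len(retval) < size:
--         assert level <= max_level, 'Missing some data after stratification.'
--         try:
--             indices = level2indices[level]
--         except KeyError:
--             indices = []
--         retval += indices
--         level += 1
--     return retval
-- ===== SOURCE B (Python) =====
-- def _get_preferred_d_indices(d_size, size, disprefer):
--     if size >= d_size or not disprefer:
--         # use all data
--         return list(range(d_size))
--     # distinct dispreference levels actually occurring, ascending;
--     # negative levels are never selected
--     levels = sorted(set(
--         v for v in (disprefer.get(i, 0) for i in range(d_size)) if v >= 0
--     ))
--     retval = []
--     for level in levels: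
--         if len(retval) >= size:
--             break
--         retval.extend(i for i in range(d_size) if disprefer.get(i, 0) == level)
--     assert len(retval) >= size, 'Missing some data after stratification.'
--     return retval
-- ===== Notes on version B (the rewrite author's own statement) =====
-- stated objective: idiomatic
-- what changed: Replaces A's level-to-indices bucket dict plus a while-loop counting through every integer level 0,1,2,... up to max_level (including absent ones) by iterating directly over the sorted set of non-negative dispreference levels actually present, collecting each level's indices with a filtering pass over the index range.
import Mathlib
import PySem

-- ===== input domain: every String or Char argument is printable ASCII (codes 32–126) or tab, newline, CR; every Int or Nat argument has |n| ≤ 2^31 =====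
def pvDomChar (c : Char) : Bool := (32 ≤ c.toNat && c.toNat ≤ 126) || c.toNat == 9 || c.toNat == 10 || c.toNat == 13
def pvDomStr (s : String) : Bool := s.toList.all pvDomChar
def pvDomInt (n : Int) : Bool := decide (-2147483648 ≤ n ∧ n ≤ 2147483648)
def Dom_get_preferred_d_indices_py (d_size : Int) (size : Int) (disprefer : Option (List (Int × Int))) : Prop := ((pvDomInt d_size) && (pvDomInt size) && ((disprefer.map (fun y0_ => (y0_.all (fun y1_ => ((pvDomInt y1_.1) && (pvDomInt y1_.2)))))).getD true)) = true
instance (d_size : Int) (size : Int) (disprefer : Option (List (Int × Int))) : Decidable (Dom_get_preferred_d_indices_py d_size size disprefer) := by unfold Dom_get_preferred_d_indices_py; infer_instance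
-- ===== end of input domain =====

-- B replaces A's bucket dict and level-counter scan by iterating over the sorted set of
-- dispreference levels actually present, filtering the index range per level (objective:
-- idiomatic; not claimed faster).

-- ===== PORT A =====
-- one body of A's stratification loop: bucket d_index under its level, track max_level;
-- each bucket is kept in reverse (cons = Python's O(1) list.append) and read back with
-- .reverse where A reads the bucket
def pvStep (d : PySem.Dict Int Int) (st : PySem.Dict Int (List Int) × Int) (d_index : Int) :
    PySem.Dict Int (List Int) × Int :=
  let level := d.getD d_index 0
  let l2i := if st.1.contains level then st.1 else st.1.insert level []
  let l2i := l2i.insert level (d_index :: l2i.getD level [])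
  (l2i, if st.2 < level then level else st.2)

-- A's 'while len(retval) < size' loop; fuel = (max_level + 1 - level).toNat, so fuel = 0
-- is exactly 'level > max_level', where Python raises AssertionError (outside Pre_)
def pvLoopA (size : Int) (l2i : PySem.Dict Int (List Int)) :
    Nat → Int → List Int → List Int
  | fuel, level, retval =>
    if (retval.length : Int) < size then
      match fuel with
      | 0 => retval  -- AssertionError 'Missing some data after stratification.' in Python
      | fuel' + 1 => pvLoopA size l2i fuel' (level + 1) (retval ++ (l2i.getD level []).reverse)
    else retval

-- A's stratified selection after the early-return guard (st = (level2indices, max_level))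
def pvSelectA (size : Int) (d : PySem.Dict Int Int) (d_size : Int) : List Int :=
  pvLoopA size ((PySem.List.pyRange 0 d_size 1).foldl (pvStep d) (PySem.Dict.empty, 0)).1
    ((((PySem.List.pyRange 0 d_size 1).foldl (pvStep d) (PySem.Dict.empty, 0)).2 + 1).toNat)
    0 []

def get_preferred_d_indices_py (d_size : Int) (size : Int) (disprefer : Option (List (Int × Int))) : List Int :=
  if size ≥ d_size ∨ (disprefer.getD []).isEmpty = true then
    PySem.List.pyRange 0 d_size 1
  else
    pvSelectA size (PySem.Dict.ofList (disprefer.getD [])) d_size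

-- ===== PORT B =====
-- B's 'for level in levels' loop with the early break once enough data is collected;
-- falling off the list with too little data is Python's AssertionError (outside Pre_)
def pvLoopB (size : Int) (d : PySem.Dict Int Int) (d_size : Int) :
    List Int → List Int → List Int
  | [], retval => retval
  | level :: rest, retval =>
    if size ≤ (retval.length : Int) then retval
    else pvLoopB size d d_size rest
      (retval ++ (PySem.List.pyRange 0 d_size 1).filter (fun i => d.getD i 0 == level))

-- B's stratified selection after the early-return guard: the occurring non-negative
-- levels, sorted ascending, then one filtering pass per selected level
def pvSelectB (size : Int) (d : PySem.Dict Int Int) (d_size : Int) : List Int :=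
  pvLoopB size d d_size
    (PySem.List.sorted
      (PySem.Set.ofList (((PySem.List.pyRange 0 d_size 1).map (fun i => d.getD i 0)).filter
        (fun v => 0 ≤ v)))
      (fun x => x) false)
    []

def get_preferred_d_indices_py_alt (d_size : Int) (size : Int) (disprefer : Option (List (Int × Int))) : List Int :=
  if size ≥ d_size ∨ (disprefer.getD []).isEmpty = true then
    PySem.List.pyRange 0 d_size 1
  else
    pvSelectB size (PySem.Dict.ofList (disprefer.getD [])) d_size

-- ===== PRECONDITION & SPEC =====
-- Pre_ excludes exactly the inputs on which both Pythons raise AssertionError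
-- ('Missing some data after stratification.'): fewer non-negative-level indices than size;
-- the non-negative-level indices are counted as d_size minus the dict keys in range
-- that carry a negative level.
def Pre_get_preferred_d_indices_py (d_size : Int) (size : Int) (disprefer : Option (List (Int × Int))) : Prop :=
  size ≥ d_size ∨ (disprefer.getD []).isEmpty = true ∨
  size ≤ d_size - (((PySem.Dict.ofList (disprefer.getD [])).items.filter
    (fun p => decide (0 ≤ p.1 ∧ p.1 < d_size ∧ p.2 < 0))).length : Int)
instance (d_size : Int) (size : Int) (disprefer : Option (List (Int × Int))) : Decidable (Pre_get_preferred_d_indices_py d_size size disprefer) := by unfold Pre_get_preferred_d_indices_py; infer_instance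

def pvWitness_get_preferred_d_indices_py : Int × Int × (Option (List (Int × Int))) := (3, 2, some [(0, 1)])

def Spec_get_preferred_d_indices_py (d_size : Int) (size : Int) (disprefer : Option (List (Int × Int))) (out : List Int) : Prop := out = get_preferred_d_indices_py_alt d_size size disprefer
instance (d_size : Int) (size : Int) (disprefer : Option (List (Int × Int))) (out : List Int) : Decidable (Spec_get_preferred_d_indices_py d_size size disprefer out) := by unfold Spec_get_preferred_d_indices_py; infer_instance

-- ===== CLAIM (what is proved, stated in full; the proofs are below) =====
def Claim_equal_get_preferred_d_indices_py : Prop := ∀ (d_size : Int) (size : Int) (disprefer : Option (List (Int × Int))), Dom_get_preferred_d_indices_py d_size size disprefer → Pre_get_preferred_d_indices_py d_size size disprefer → Spec_get_preferred_d_indices_py d_size size disprefer (get_preferred_d_indices_py d_size size disprefer)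

-- ===== LEMMAS AND PROOFS =====

-- pvG d d_size ℓ: the indices at level ℓ, in ascending order
def pvG (d : PySem.Dict Int Int) (d_size ℓ : Int) : List Int :=
  (PySem.List.pyRange 0 d_size 1).filter (fun i => d.getD i 0 == ℓ)

-- unfolding lemmas for the two loops
lemma pvLoopA_zero (size : Int) (l2i : PySem.Dict Int (List Int)) (level : Int) (retval : List Int) :
    pvLoopA size l2i 0 level retval = retval := by
  rw [pvLoopA.eq_def]
  repeat' split
  all_goals first | rfl | (exfalso; omega)

lemma pvLoopA_succ_lt (size : Int) (l2i : PySem.Dict Int (List Int)) (fuel : Nat) (level : Int)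
    (retval : List Int) (h : (retval.length : Int) < size) :
    pvLoopA size l2i (fuel + 1) level retval =
      pvLoopA size l2i fuel (level + 1) (retval ++ (l2i.getD level []).reverse) := by
  conv_lhs => rw [pvLoopA.eq_def]
  show (if (retval.length : Int) < size then
      pvLoopA size l2i fuel (level + 1) (retval ++ (l2i.getD level []).reverse) else retval) = _
  rw [if_pos h]

lemma pvLoopA_ge (size : Int) (l2i : PySem.Dict Int (List Int)) (fuel : Nat) (level : Int)
    (retval : List Int) (h : ¬ (retval.length : Int) < size) :
    pvLoopA size l2i fuel level retval = retval := by
  conv_lhs => rw [pvLoopA.eq_def]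
  show (if (retval.length : Int) < size then
      (match fuel with
       | 0 => retval
       | fuel' + 1 => pvLoopA size l2i fuel' (level + 1) (retval ++ (l2i.getD level []).reverse)) else retval) = _
  rw [if_neg h]

lemma pvLoopB_cons_lt (size : Int) (d : PySem.Dict Int Int) (d_size : Int) (level : Int)
    (rest retval : List Int) (h : ¬ size ≤ (retval.length : Int)) :
    pvLoopB size d d_size (level :: rest) retval =
      pvLoopB size d d_size rest
        (retval ++ (PySem.List.pyRange 0 d_size 1).filter (fun i => d.getD i 0 == level)) := by
  rw [pvLoopB, if_neg h]

lemma pvLoopB_cons_ge (size : Int) (d : PySem.Dict Int Int) (d_size : Int) (level : Int)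
    (rest retval : List Int) (h : size ≤ (retval.length : Int)) :
    pvLoopB size d d_size (level :: rest) retval = retval := by
  rw [pvLoopB, if_pos h]

-- A's bucket dict maps each level to the ascending indices at that level
lemma pvStep_fst_getD (d : PySem.Dict Int Int) (st : PySem.Dict Int (List Int) × Int)
    (i ℓ : Int) :
    (pvStep d st i).1.getD ℓ [] =
      (if d.getD i 0 == ℓ then [i] else []) ++ st.1.getD ℓ [] := by
  simp only [pvStep]
  by_cases hc : st.1.contains (d.getD i 0) = true
  · rw [if_pos hc]
    rw [PySem.Dict.getD_insert]
    by_cases hℓ : ℓ = d.getD i 0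
    · subst hℓ; simp
    · have hbeq : (d.getD i 0 == ℓ) = false := by
        simpa using fun h => hℓ h.symm
      simp [hℓ, hbeq]
  · rw [if_neg hc]
    rw [PySem.Dict.getD_insert, PySem.Dict.getD_insert]
    by_cases hℓ : ℓ = d.getD i 0
    · subst hℓ
      have h0 : st.1.getD (d.getD i 0) [] = [] :=
        PySem.Dict.getD_of_not_contains st.1 [] (by simpa using hc)
      simp [h0]
    · have hbeq : (d.getD i 0 == ℓ) = false := by
        simpa using fun h => hℓ h.symm
      simp [hℓ, hbeq, PySem.Dict.getD_insert]

lemma pvStep_getD (d : PySem.Dict Int Int) (xs : List Int) :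
    ∀ (st : PySem.Dict Int (List Int) × Int) (ℓ : Int),
      ((xs.foldl (pvStep d) st).1).getD ℓ [] =
        (xs.filter (fun i => d.getD i 0 == ℓ)).reverse ++ st.1.getD ℓ [] := by
  induction xs with
  | nil => intro st ℓ; simp
  | cons i xs ih =>
    intro st ℓ
    simp only [List.foldl_cons, List.filter_cons]
    rw [ih, pvStep_fst_getD]
    by_cases hb : (d.getD i 0 == ℓ) = true
    · simp [hb, List.append_assoc]
    · simp [hb]

lemma pvStep_snd_mono (d : PySem.Dict Int Int) (xs : List Int) :
    ∀ st : PySem.Dict Int (List Int) × Int, st.2 ≤ (xs.foldl (pvStep d) st).2 := by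
  induction xs with
  | nil => intro st; simp
  | cons i xs ih =>
    intro st
    have h1 : st.2 ≤ (pvStep d st i).2 := by
      unfold pvStep; dsimp only; split <;> omega
    exact le_trans h1 (by simpa using ih (pvStep d st i))

lemma pvStep_snd_ge (d : PySem.Dict Int Int) (xs : List Int) :
    ∀ (st : PySem.Dict Int (List Int) × Int) (i : Int), i ∈ xs →
      d.getD i 0 ≤ (xs.foldl (pvStep d) st).2 := by
  induction xs with
  | nil => intro st i h; simp at h
  | cons j xs ih =>
    intro st i hi
    rcases List.mem_cons.mp hi with h | h
    · subst h
      have h1 : d.getD i 0 ≤ (pvStep d st i).2 := by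
        unfold pvStep; dsimp only; split <;> omega
      exact le_trans h1 (by simpa using pvStep_snd_mono d xs (pvStep d st i))
    · simpa using ih (pvStep d st j) i h

-- the bisimulation: A's level counter visits exactly the levels of B's sorted list,
-- skipping absent levels (empty buckets), with the same stopping rule
lemma pvBisim (size : Int) (d : PySem.Dict Int Int) (d_size : Int)
    (l2i : PySem.Dict Int (List Int))
    (hG : ∀ ℓ, l2i.getD ℓ [] = (pvG d d_size ℓ).reverse) :
    ∀ (fuel : Nat) (c : Int) (L retval : List Int),
      L.Pairwise (· < ·) →
      (∀ ℓ, ℓ ∈ L ↔ (c ≤ ℓ ∧ pvG d d_size ℓ ≠ [])) →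
      (∀ ℓ, pvG d d_size ℓ ≠ [] → ℓ < c + (fuel : Int)) →
      pvLoopA size l2i fuel c retval = pvLoopB size d d_size L retval := by
  intro fuel
  induction fuel with
  | zero =>
    intro c L retval _ hmem hbound
    have hL : L = [] := by
      cases L with
      | nil => rfl
      | cons a t =>
        have h1 := (hmem a).mp List.mem_cons_self
        have h2 := hbound a h1.2
        have := h1.1
        simp at h2
        omega
    subst hL
    rw [pvLoopA_zero]
    rfl
  | succ fuel ih =>
    intro c L retval hpw hmem hbound
    by_cases hs : (retval.length : Int) < size
    · rw [pvLoopA_succ_lt _ _ _ _ _ hs, hG, List.reverse_reverse]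
      by_cases hGc : pvG d d_size c = []
      · -- level c absent: A appends nothing, B's list is unchanged
        rw [hGc, List.append_nil]
        apply ih (c + 1) L retval hpw
        · intro ℓ
          rw [hmem ℓ]
          constructor
          · rintro ⟨h1, h2⟩
            refine ⟨?_, h2⟩
            rcases lt_or_eq_of_le h1 with h | h
            · omega
            · exact absurd hGc (by rw [h]; exact h2)
          · rintro ⟨h1, h2⟩; exact ⟨by omega, h2⟩
        · intro ℓ hℓ; have := hbound ℓ hℓ; push_cast at this ⊢; omega
      · -- level c present: it must be the head of L
        have hcL : c ∈ L := (hmem c).mpr ⟨le_refl c, hGc⟩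
        cases L with
        | nil => simp at hcL
        | cons a rest =>
          have ha : a = c := by
            have hca : c ≤ a := ((hmem a).mp List.mem_cons_self).1
            rcases List.mem_cons.mp hcL with h | h
            · omega
            · have := (List.pairwise_cons.mp hpw).1 c h
              omega
          subst ha
          rw [pvLoopB_cons_lt _ _ _ _ _ _ (by omega)]
          have hpw' := (List.pairwise_cons.mp hpw).2
          have hhead := (List.pairwise_cons.mp hpw).1
          have hfold : (PySem.List.pyRange 0 d_size 1).filter (fun i => d.getD i 0 == a) =
              pvG d d_size a := rfl
          rw [hfold]
          apply ih (a + 1) rest _ hpw'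
          · intro ℓ
            constructor
            · intro hℓ
              have h1 := hhead ℓ hℓ
              have h2 := ((hmem ℓ).mp (List.mem_cons_of_mem a hℓ)).2
              exact ⟨by omega, h2⟩
            · rintro ⟨h1, h2⟩
              have := (hmem ℓ).mpr ⟨by omega, h2⟩
              rcases List.mem_cons.mp this with h | h
              · omega
              · exact h
          · intro ℓ hℓ; have := hbound ℓ hℓ; push_cast at this ⊢; omega
    · -- enough data already: both loops stop
      rw [pvLoopA_ge _ _ _ _ _ hs]
      cases L with
      | nil => rfl
      | cons a rest => rw [pvLoopB_cons_ge _ _ _ _ _ _ (by omega)]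

-- membership in B's sorted level set: the non-negative levels with a non-empty group
lemma pvLevels_mem (d : PySem.Dict Int Int) (d_size ℓ : Int) :
    (ℓ ∈ PySem.List.sorted
      (PySem.Set.ofList (((PySem.List.pyRange 0 d_size 1).map (fun i => d.getD i 0)).filter
        (fun v => 0 ≤ v))) (fun x => x) false) ↔
    (0 ≤ ℓ ∧ pvG d d_size ℓ ≠ []) := by
  rw [PySem.List.mem_sorted, PySem.Set.mem_ofList, List.mem_filter]
  unfold pvG
  constructor
  · rintro ⟨h1, h2⟩
    refine ⟨by simpa using h2, ?_⟩
    intro hnil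
    rw [List.filter_eq_nil_iff] at hnil
    rcases List.mem_map.mp h1 with ⟨i, hi, hiℓ⟩
    exact hnil i hi (by simp [hiℓ])
  · rintro ⟨h1, h2⟩
    rcases List.exists_mem_of_ne_nil _ h2 with ⟨i, hi⟩
    rw [List.mem_filter] at hi
    have hℓ : d.getD i 0 = ℓ := by simpa using hi.2
    exact ⟨List.mem_map.mpr ⟨i, hi.1, hℓ⟩, by simpa using h1⟩

-- the two selection phases agree (for every dict and range; Pre_ is not needed here)
lemma pvSelect_eq (size : Int) (d : PySem.Dict Int Int) (d_size : Int) :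
    pvSelectA size d d_size = pvSelectB size d d_size := by
  unfold pvSelectA pvSelectB
  set st := (PySem.List.pyRange 0 d_size 1).foldl (pvStep d) (PySem.Dict.empty, 0) with hst
  have hG : ∀ ℓ, st.1.getD ℓ [] = (pvG d d_size ℓ).reverse := by
    intro ℓ
    rw [hst, pvStep_getD]
    simp [pvG]
  have hmax0 : (0 : Int) ≤ st.2 := by
    simpa using pvStep_snd_mono d (PySem.List.pyRange 0 d_size 1) (PySem.Dict.empty, 0)
  have hbound : ∀ ℓ, pvG d d_size ℓ ≠ [] → ℓ < 0 + (((st.2 + 1).toNat : Nat) : Int) := by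
    intro ℓ hℓ
    rcases List.exists_mem_of_ne_nil _ hℓ with ⟨i, hi⟩
    rw [pvG, List.mem_filter] at hi
    have h1 : d.getD i 0 = ℓ := by simpa using hi.2
    have h2 := pvStep_snd_ge d (PySem.List.pyRange 0 d_size 1) (PySem.Dict.empty, 0) i hi.1
    rw [← hst] at h2
    omega
  exact pvBisim size d d_size st.1 hG ((st.2 + 1).toNat) 0 _ []
    (PySem.List.sorted_ofList_pairwise_lt _)
    (fun ℓ => pvLevels_mem d d_size ℓ)
    hbound

-- ===== VERDICT (by name: the statement is the Claim_ definition above) =====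
theorem get_preferred_d_indices_py_spec : Claim_equal_get_preferred_d_indices_py := by
  intro d_size size disprefer _ _
  unfold Spec_get_preferred_d_indices_py
  unfold get_preferred_d_indices_py get_preferred_d_indices_py_alt
  by_cases hguard : size ≥ d_size ∨ (disprefer.getD []).isEmpty = true
  · rw [if_pos hguard, if_pos hguard]
  · rw [if_neg hguard, if_neg hguard, pvSelect_eq]
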